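-- pv_equiv track=rewrite | github.com/BASE-Laboratory/OpenImpala | python/openimpala/facade.py | _auto_grid_size
-- ===== SOURCE A (Python) =====
-- def _auto_grid_size(shape: tuple[int, ...]) -> int:
--     """Pick a good AMReX max_grid_size based on domain dimensions.
--
--     Heuristic: use the largest power-of-two that evenly divides the
--     smallest dimension, clamped to [16, 128].  For small domains this
--     avoids unnecessary box splitting; for large domains it keeps MPI
--     load-balanced.
--     """
--     n_min = min(shape)
--     mgs = 16
--     for candidate in (128, 64, 32, 16):
--         if n_min >= candidate and n_min % candidate == 0:
--             mgs = candidate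
--             break
--     return mgs
-- ===== SOURCE B (Python) =====
-- def _auto_grid_size(shape):
--     n_min = min(shape)
--     mgs = 16
--     while mgs < 128 and mgs * 2 <= n_min and n_min % (mgs * 2) == 0:
--         mgs *= 2
--     return mgs
-- ===== Notes on version B (the rewrite author's own statement) =====
-- stated objective: alternative
-- what changed: Replaces the descending scan over the fixed candidate tuple (with break on first hit) by an ascending doubling loop that grows mgs from 16 while the doubled size still divides and fits the minimum dimension (power-of-two divisors form a chain, so greedy doubling reaches the same largest candidate).
import Mathlib
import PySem

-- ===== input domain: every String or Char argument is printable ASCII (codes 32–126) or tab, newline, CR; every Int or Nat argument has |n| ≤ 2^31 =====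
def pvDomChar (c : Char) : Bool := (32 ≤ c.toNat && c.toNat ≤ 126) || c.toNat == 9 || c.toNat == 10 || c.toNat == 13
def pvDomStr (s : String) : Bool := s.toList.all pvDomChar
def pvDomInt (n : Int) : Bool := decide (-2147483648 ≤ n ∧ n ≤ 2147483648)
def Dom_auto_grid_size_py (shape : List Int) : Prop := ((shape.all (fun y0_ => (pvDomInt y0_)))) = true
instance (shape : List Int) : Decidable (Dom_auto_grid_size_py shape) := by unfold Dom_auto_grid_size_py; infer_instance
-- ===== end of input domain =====

-- B replaces the descending candidate scan with an ascending doubling loop (alternative decomposition, same cost).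

-- ===== PORT A =====
-- the descending for-candidate loop with break: first candidate that passes, else the default 16
def agsLoopA (nmin : Int) : List Int → Int
  | [] => 16
  | c :: cs => if nmin ≥ c ∧ PySem.Int.mod nmin c = 0 then c else agsLoopA nmin cs

def auto_grid_size_py (shape : List Int) : Int :=
  match PySem.List.min? shape id with
  | some nmin => agsLoopA nmin [128, 64, 32, 16]
  | none => 16   -- unreachable: Pre_ requires shape ≠ [] (Python min raises ValueError)

-- ===== PORT B =====
-- the 'while mgs < 128 and …: mgs *= 2' loop; fuel 3 only makes it total (mgs < 128 stops it after ≤ 3 doublings)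
def agsLoopB (nmin : Int) : Nat → Int → Int
  | 0, mgs => mgs
  | f + 1, mgs =>
      if mgs < 128 ∧ mgs * 2 ≤ nmin ∧ PySem.Int.mod nmin (mgs * 2) = 0 then
        agsLoopB nmin f (mgs * 2)
      else mgs

def auto_grid_size_py_alt (shape : List Int) : Int :=
  match PySem.List.min? shape id with
  | some nmin => agsLoopB nmin 3 16
  | none => 16   -- unreachable under Pre_

-- ===== PRECONDITION & SPEC =====
-- Python's min raises ValueError on an empty tuple, so the empty shape is excluded.
def Pre_auto_grid_size_py (shape : List Int) : Prop := shape ≠ []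
instance (shape : List Int) : Decidable (Pre_auto_grid_size_py shape) := by unfold Pre_auto_grid_size_py; infer_instance
def pvWitness_auto_grid_size_py : List Int := [96, 200]

def Spec_auto_grid_size_py (shape : List Int) (out : Int) : Prop := out = auto_grid_size_py_alt shape
instance (shape : List Int) (out : Int) : Decidable (Spec_auto_grid_size_py shape out) := by unfold Spec_auto_grid_size_py; infer_instance

-- ===== CLAIM (what is proved, stated in full; the proofs are below) =====
def Claim_equal_auto_grid_size_py : Prop := ∀ (shape : List Int), Dom_auto_grid_size_py shape → Pre_auto_grid_size_py shape → Spec_auto_grid_size_py shape (auto_grid_size_py shape)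

-- ===== LEMMAS AND PROOFS =====
lemma agsLoop_eq (n : Int) : agsLoopA n [128, 64, 32, 16] = agsLoopB n 3 16 := by
  have h16 : PySem.Int.mod n 16 = n % 16 := PySem.Int.mod_eq_emod_of_pos (by norm_num)
  have h32 : PySem.Int.mod n 32 = n % 32 := PySem.Int.mod_eq_emod_of_pos (by norm_num)
  have h64 : PySem.Int.mod n 64 = n % 64 := PySem.Int.mod_eq_emod_of_pos (by norm_num)
  have h128 : PySem.Int.mod n 128 = n % 128 := PySem.Int.mod_eq_emod_of_pos (by norm_num)
  simp only [agsLoopA, agsLoopB, h16, h32, h64, h128]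
  norm_num
  split_ifs <;> omega

-- ===== VERDICT (by name: the statement is the Claim_ definition above) =====
theorem auto_grid_size_py_spec : Claim_equal_auto_grid_size_py := by
  intro shape _ _
  unfold Spec_auto_grid_size_py auto_grid_size_py auto_grid_size_py_alt
  cases h : PySem.List.min? shape id with
  | none => rfl
  | some nmin => exact agsLoop_eq nmin
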